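-- pv_equiv track=rewrite | github.com/mountzou/upat-nzc-energyplus | backend/app/services/service_idf.py | _split_idf_objects
-- ===== SOURCE A (Python) =====
-- def _split_idf_objects(contents: str):
--     objects = []
--     current = []
--
--     for line in contents.splitlines(keepends=True):
--         current.append(line)
--         if ";" in line:
--             objects.append(current)
--             current = []
--
--     if current:
--         objects.append(current)
--
--     return objects
-- ===== SOURCE B (Python) =====
-- def _split_idf_objects(contents: str):
--     lines = contents.splitlines(keepends=True)
--     boundary = [i for i, line in enumerate(lines) if ";" in line]
--     objects = []
--     start = 0
--     for i in boundary:
--         objects.append(lines[start:i + 1])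
--         start = i + 1
--     if start < len(lines):
--         objects.append(lines[start:])
--     return objects
-- ===== Notes on version B (the rewrite author's own statement) =====
-- stated objective: alternative
-- what changed: A accumulates a current group and flushes it whenever a line contains a semicolon; B first collects the boundary indices of semicolon lines with one enumerate pass and then builds the groups by slicing between consecutive boundaries, appending the remainder slice at the end.
import Mathlib
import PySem

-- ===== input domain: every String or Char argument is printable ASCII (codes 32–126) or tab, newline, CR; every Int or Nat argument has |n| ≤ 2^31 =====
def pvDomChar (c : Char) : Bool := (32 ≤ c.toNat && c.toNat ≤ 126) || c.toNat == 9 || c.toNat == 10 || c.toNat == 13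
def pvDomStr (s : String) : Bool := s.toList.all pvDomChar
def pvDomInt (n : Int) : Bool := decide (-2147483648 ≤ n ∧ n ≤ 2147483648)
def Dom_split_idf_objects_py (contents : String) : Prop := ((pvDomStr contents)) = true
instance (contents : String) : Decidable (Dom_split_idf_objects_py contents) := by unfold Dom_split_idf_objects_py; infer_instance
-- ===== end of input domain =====

-- B replaces A's accumulate-and-flush loop by an index pass: it collects the boundary
-- indices of lines containing ';' and builds the groups by slicing (objective: alternative decomposition).

-- shared helper: str.splitlines(keepends=True); exact for the line breaks '\n', '\r', '\r\n'
-- (the only line breaks that can occur on the stated ASCII domain)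
def splitKeep : List Char → List Char → List String
  | acc, [] => if acc = [] then [] else [String.ofList acc]
  | acc, '\r' :: '\n' :: rest => String.ofList (acc ++ ['\r', '\n']) :: splitKeep [] rest
  | acc, '\r' :: rest => String.ofList (acc ++ ['\r']) :: splitKeep [] rest
  | acc, '\n' :: rest => String.ofList (acc ++ ['\n']) :: splitKeep [] rest
  | acc, c :: rest => splitKeep (acc ++ [c]) rest

def pySplitlinesKeep (s : String) : List String := splitKeep [] s.toList

-- ===== PORT A =====
-- the body of A's for-loop: append the line to current, flush current on ';'
def stepA (st : List (List String) × List String) (line : String) : List (List String) × List String :=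
  let current := st.2 ++ [line]
  if PySem.Str.isIn ";" line then (st.1 ++ [current], []) else (st.1, current)

def split_idf_objects_py (contents : String) : List (List String) :=
  let p := (pySplitlinesKeep contents).foldl stepA ([], [])
  if p.2 = [] then p.1 else p.1 ++ [p.2]

-- ===== PORT B =====
-- enumerate(lines)
def enumFrom : Nat → List String → List (Nat × String)
  | _, [] => []
  | n, x :: xs => (n, x) :: enumFrom (n + 1) xs

-- the body of B's for-loop over the boundary indices: append lines[start:i+1], start = i+1
def stepB (lines : List String) (st : List (List String) × Nat) (i : Nat) : List (List String) × Nat :=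
  (st.1 ++ [PySem.List.slice lines (some (st.2 : Int)) (some ((i : Int) + 1))], i + 1)

def split_idf_objects_py_alt (contents : String) : List (List String) :=
  let lines := pySplitlinesKeep contents
  let boundary := ((enumFrom 0 lines).filter (fun p => PySem.Str.isIn ";" p.2)).map (fun p => p.1)
  let p := boundary.foldl (stepB lines) ([], 0)
  if p.2 < lines.length then p.1 ++ [PySem.List.slice lines (some (p.2 : Int)) none] else p.1

-- ===== PRECONDITION & SPEC =====
def Spec_split_idf_objects_py (contents : String) (out : List (List String)) : Prop := out = split_idf_objects_py_alt contents
instance (contents : String) (out : List (List String)) : Decidable (Spec_split_idf_objects_py contents out) := by unfold Spec_split_idf_objects_py; infer_instance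

-- ===== CLAIM (what is proved, stated in full; the proofs are below) =====
def Claim_equal_split_idf_objects_py : Prop := ∀ (contents : String), Dom_split_idf_objects_py contents → Spec_split_idf_objects_py contents (split_idf_objects_py contents)

-- ===== LEMMAS AND PROOFS =====

/-- common characterisation of both programs' result: the groups of lines,
each group ending at its first ';'-line. -/
def G : List String → List (List String)
  | [] => []
  | l :: ls =>
    if PySem.Str.isIn ";" l then [l] :: G ls
    else match G ls with
         | [] => [[l]]
         | g :: gs => (l :: g) :: gs

def consTo (cur : List String) : List (List String) → List (List String)
  | [] => if cur = [] then [] else [cur]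
  | g :: gs => (cur ++ g) :: gs

theorem foldA_eq (ls : List String) : ∀ (objs : List (List String)) (cur : List String),
    (let p := ls.foldl stepA (objs, cur); if p.2 = [] then p.1 else p.1 ++ [p.2])
      = objs ++ consTo cur (G ls) := by
  induction ls with
  | nil =>
    intro objs cur
    simp only [List.foldl_nil]
    by_cases h : cur = [] <;> simp [h, consTo, G]
  | cons l ls ih =>
    intro objs cur
    simp only [List.foldl_cons, stepA]
    by_cases h : PySem.Str.isIn ";" l = true
    · have hc : PySem.Chars.isIn [';'] l.toList = true := by simpa using h
      rw [if_pos h, ih]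
      have hG : G (l :: ls) = [l] :: G ls := by simp [G, hc]
      rw [hG]
      cases hg : G ls <;> simp [consTo]
    · have hc : PySem.Chars.isIn [';'] l.toList = false := by simpa using h
      rw [if_neg h, ih]
      have hG : G (l :: ls) = (match G ls with | [] => [[l]] | g :: gs => (l :: g) :: gs) := by
        simp [G, hc]
      rw [hG]
      cases hg : G ls <;> simp [consTo]

def bnd (lines : List String) : List Nat :=
  ((enumFrom 0 lines).filter (fun p => PySem.Str.isIn ";" p.2)).map (fun p => p.1)

theorem enumFrom_succ (xs : List String) : ∀ n,
    enumFrom (n + 1) xs = (enumFrom n xs).map (fun p => (p.1 + 1, p.2)) := by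
  induction xs with
  | nil => intro n; simp [enumFrom]
  | cons x xs ih => intro n; simp [enumFrom, ih]

theorem bnd_cons (l : String) (ls : List String) :
    bnd (l :: ls) = if PySem.Str.isIn ";" l then 0 :: (bnd ls).map (· + 1) else (bnd ls).map (· + 1) := by
  unfold bnd
  rw [show enumFrom 0 (l :: ls) = (0, l) :: enumFrom 1 ls from rfl, enumFrom_succ]
  rw [List.filter_cons]
  by_cases h : PySem.Str.isIn ";" l = true
  · rw [if_pos h, if_pos (by exact h)]
    simp only [List.map_cons, List.filter_map, List.map_map]
    rfl
  · rw [if_neg h, if_neg (by exact h)]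
    simp only [List.filter_map, List.map_map]
    rfl

theorem slice_nat (xs : List String) (a b : Nat) :
    PySem.List.slice xs (some (a : Int)) (some ((b : Int) + 1)) = (xs.drop a).take (b + 1 - a) := by
  rw [show ((b : Int) + 1) = ((b + 1 : Nat) : Int) by push_cast; ring, PySem.List.slice_natCast]

theorem slice_shift (l : String) (ls : List String) (st i : Nat) :
    PySem.List.slice (l :: ls) (some ((st + 1 : Nat) : Int)) (some (((i + 1 : Nat) : Int) + 1))
      = PySem.List.slice ls (some (st : Int)) (some ((i : Int) + 1)) := by
  rw [slice_nat, slice_nat, List.drop_succ_cons]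
  congr 1
  omega

theorem slice_from_shift (l : String) (ls : List String) (st : Nat) :
    PySem.List.slice (l :: ls) (some ((st + 1 : Nat) : Int))
      = PySem.List.slice ls (some ((st : Nat) : Int)) := by
  rw [PySem.List.slice_from_natCast, PySem.List.slice_from_natCast, List.drop_succ_cons]

theorem slice_head (l : String) (ls : List String) (i : Nat) :
    PySem.List.slice (l :: ls) (some ((0 : Nat) : Int)) (some (((i + 1 : Nat) : Int) + 1))
      = l :: PySem.List.slice ls (some ((0 : Nat) : Int)) (some ((i : Int) + 1)) := by
  rw [slice_nat, slice_nat]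
  simp [List.take_succ_cons]

theorem foldB_objs (lines : List String) (bs : List Nat) : ∀ (objs : List (List String)) (st : Nat),
    bs.foldl (stepB lines) (objs, st)
      = (objs ++ (bs.foldl (stepB lines) ([], st)).1, (bs.foldl (stepB lines) ([], st)).2) := by
  induction bs with
  | nil => intro objs st; simp
  | cons i bs ih =>
    intro objs st
    simp only [List.foldl_cons, stepB, List.nil_append]
    rw [ih, ih [PySem.List.slice lines (some (st : Int)) (some ((i : Int) + 1))]]
    simp

theorem foldB_shift (bs : List Nat) (l : String) (ls : List String) :
    ∀ (objs : List (List String)) (st : Nat),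
    (bs.map (· + 1)).foldl (stepB (l :: ls)) (objs, st + 1)
      = ((bs.foldl (stepB ls) (objs, st)).1, (bs.foldl (stepB ls) (objs, st)).2 + 1) := by
  induction bs with
  | nil => intro objs st; simp
  | cons i bs ih =>
    intro objs st
    simp only [List.map_cons, List.foldl_cons, stepB]
    rw [slice_shift, ih]

theorem B_eq (lines : List String) :
    (let p := (bnd lines).foldl (stepB lines) ([], 0);
      if p.2 < lines.length then p.1 ++ [PySem.List.slice lines (some (p.2 : Int))] else p.1)
      = G lines := by
  induction lines with
  | nil => simp [bnd, enumFrom, G]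
  | cons l ls ih =>
    simp only [] at ih ⊢
    rw [bnd_cons]
    by_cases h : PySem.Str.isIn ";" l = true
    · have hc : PySem.Chars.isIn [';'] l.toList = true := by simpa using h
      rw [if_pos h]
      simp only [List.foldl_cons]
      have h0 : stepB (l :: ls) ([], 0) 0 = ([[l]], 0 + 1) := by
        simp only [stepB, List.nil_append]
        rw [show ((0 : Nat) : Int) + 1 = (((0 : Nat) + 1 : Nat) : Int) by norm_num]
        rw [PySem.List.slice_natCast]
        rfl
      rw [h0, foldB_shift, foldB_objs]
      set q := (bnd ls).foldl (stepB ls) ([], 0) with hq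
      have hG : G (l :: ls) = [l] :: G ls := by simp [G, hc]
      rw [hG, ← ih]
      by_cases hlt : q.2 < ls.length
      · rw [if_pos (show q.2 + 1 < (l :: ls).length by simp; omega), if_pos hlt]
        rw [slice_from_shift]
        simp
      · rw [if_neg (show ¬ q.2 + 1 < (l :: ls).length by simp; omega), if_neg hlt]
        simp
    · have hc : PySem.Chars.isIn [';'] l.toList = false := by simpa using h
      rw [if_neg h]
      have hG : G (l :: ls) = (match G ls with | [] => [[l]] | g :: gs => (l :: g) :: gs) := by
        simp [G, hc]
      cases hb : bnd ls with
      | nil =>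
        rw [hb] at ih
        simp only [List.foldl_nil] at ih
        simp only [List.map_nil, List.foldl_nil]
        rw [if_pos (show (0:Nat) < (l :: ls).length by simp)]
        rw [PySem.List.slice_from_natCast]
        simp only [List.drop_zero, List.nil_append]
        rw [hG]
        by_cases hl : 0 < ls.length
        · rw [if_pos hl] at ih
          rw [PySem.List.slice_from_natCast] at ih
          simp only [List.drop_zero, List.nil_append] at ih
          rw [← ih]
        · have hnil : ls = [] := by cases ls with
            | nil => rfl
            | cons a as => simp at hl
          subst hnil
          simp [G]
      | cons i bs =>
        rw [hb] at ih
        simp only [List.map_cons, List.foldl_cons] at ih ⊢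
        have hstep : stepB (l :: ls) ([], 0) (i + 1)
            = ([l :: PySem.List.slice ls (some ((0 : Nat) : Int)) (some ((i : Int) + 1))], (i + 1) + 1) := by
          simp only [stepB, List.nil_append]
          rw [slice_head]
        have hstep0 : stepB ls ([], 0) i
            = ([PySem.List.slice ls (some ((0 : Nat) : Int)) (some ((i : Int) + 1))], i + 1) := by
          simp only [stepB, List.nil_append]
        rw [hstep, foldB_shift, foldB_objs]
        rw [hstep0, foldB_objs] at ih
        set s0 := PySem.List.slice ls (some ((0 : Nat) : Int)) (some ((i : Int) + 1)) with hs0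
        set q := bs.foldl (stepB ls) ([], i + 1) with hq
        rw [hG, ← ih]
        by_cases hlt : q.2 < ls.length
        · rw [if_pos (show q.2 + 1 < (l :: ls).length by simp; omega), if_pos hlt, slice_from_shift]
          simp
        · rw [if_neg (show ¬ q.2 + 1 < (l :: ls).length by simp; omega), if_neg hlt]
          simp

-- ===== VERDICT (by name: the statement is the Claim_ definition above) =====
theorem split_idf_objects_py_spec : Claim_equal_split_idf_objects_py := by
  intro contents _
  unfold Spec_split_idf_objects_py split_idf_objects_py split_idf_objects_py_alt
  have hA := foldA_eq (pySplitlinesKeep contents) [] []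
  have hB := B_eq (pySplitlinesKeep contents)
  simp only [] at hA hB ⊢
  rw [hA]
  rw [show ((enumFrom 0 (pySplitlinesKeep contents)).filter (fun p => PySem.Str.isIn ";" p.2)).map (fun p => p.1) = bnd (pySplitlinesKeep contents) from rfl]
  rw [hB]
  cases G (pySplitlinesKeep contents) with
  | nil => simp [consTo]
  | cons g gs => simp [consTo]
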